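-- pv_equiv track=rewrite | github.com/a-golda/leetcode | sliding_window/76_Minimum_Window_Substring.py | check
-- ===== SOURCE A (Python) =====
-- def check(str_, substr_):
--     if len(substr_)>len(str_):
--         return False
--
--     str_ = list(str_)
--     tmp_substr_ = list(substr_)
--     for letter in substr_:
--         if letter in str_:
--             tmp_substr_.remove(letter)
--             str_.remove(letter)
--         else:
--             break
--
--     if len(tmp_substr_)==0:
--         return True
--     else:
--         return False
-- ===== SOURCE B (Python) =====
-- def check(str_, substr_):
--     s = sorted(str_)
--     t = sorted(substr_)
--     i = 0
--     for c in t: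
--         while i < len(s) and s[i] < c:
--             i += 1
--         if i == len(s) or s[i] != c:
--             return False
--         i += 1
--     return True
-- ===== Notes on version B (the rewrite author's own statement) =====
-- stated objective: faster
-- what changed: Replaces A's repeated linear membership/remove scans over a shrinking list with sorting both strings once and a single two-pointer merge pass that consumes one str_ char per substr_ char.
import Mathlib
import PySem

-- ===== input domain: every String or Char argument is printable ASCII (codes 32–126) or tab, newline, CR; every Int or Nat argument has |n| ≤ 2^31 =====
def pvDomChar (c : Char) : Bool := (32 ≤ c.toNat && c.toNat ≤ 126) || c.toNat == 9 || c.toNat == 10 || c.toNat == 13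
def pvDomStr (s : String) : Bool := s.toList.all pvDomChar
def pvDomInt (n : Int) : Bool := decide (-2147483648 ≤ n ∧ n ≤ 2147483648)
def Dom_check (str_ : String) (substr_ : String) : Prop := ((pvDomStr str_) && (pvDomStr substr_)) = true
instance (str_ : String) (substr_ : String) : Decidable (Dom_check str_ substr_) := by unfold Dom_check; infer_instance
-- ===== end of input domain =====

-- B replaces A's repeated membership/remove scans by sorting both strings and one two-pointer merge pass (objective: faster; a timing run measured B faster at the largest sizes).

-- ===== PORT A =====
-- the for-loop over substr_: s and tmp are the mutable lists str_ and tmp_substr_; 'break' = return tmp as it stands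
def checkLoop (s tmp : List Char) : List Char → List Char
  | [] => tmp
  | l :: ls => if l ∈ s then checkLoop (s.erase l) (tmp.erase l) ls else tmp

def check (str_ : String) (substr_ : String) : Bool :=
  if substr_.toList.length > str_.toList.length then false
  else decide ((checkLoop str_.toList substr_.toList substr_.toList).length = 0)

-- ===== PORT B =====
-- the for-c-in-t loop fused with its inner while (skip s-chars < c): two pointers over the sorted lists
def mergeLoop : List Char → List Char → Bool
  | _, [] => true
  | [], _ :: _ => false
  | a :: s, c :: t => if a < c then mergeLoop s (c :: t) else if a = c then mergeLoop s t else false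

def check_alt (str_ : String) (substr_ : String) : Bool :=
  mergeLoop (PySem.List.sorted str_.toList (fun c => c) false)
            (PySem.List.sorted substr_.toList (fun c => c) false)

-- ===== PRECONDITION & SPEC =====
def Spec_check (str_ : String) (substr_ : String) (out : Bool) : Prop := out = check_alt str_ substr_
instance (str_ : String) (substr_ : String) (out : Bool) : Decidable (Spec_check str_ substr_ out) := by unfold Spec_check; infer_instance

-- ===== CLAIM (what is proved, stated in full; the proofs are below) =====
def Claim_equal_check : Prop := ∀ (str_ : String) (substr_ : String), Dom_check str_ substr_ → Spec_check str_ substr_ (check str_ substr_)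

-- ===== LEMMAS AND PROOFS =====

-- A's loop, started with tmp = the letters themselves, succeeds iff substr_'s multiset is contained in str_'s
theorem checkLoop_iff : ∀ (sub s : List Char),
    ((checkLoop s sub sub).length = 0) ↔ (↑sub : Multiset Char) ≤ (↑s : Multiset Char) := by
  intro sub
  induction sub with
  | nil => intro s; simp [checkLoop]
  | cons l ls ih =>
    intro s
    by_cases hmem : l ∈ s
    · have : checkLoop s (l :: ls) (l :: ls) = checkLoop (s.erase l) ls ls := by
        simp [checkLoop, hmem, List.erase_cons_head]
      rw [this, ih (s.erase l)]
      have hs : (↑s : Multiset Char) = l ::ₘ (↑(s.erase l) : Multiset Char) := by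
        rw [← Multiset.coe_erase]
        exact (Multiset.cons_erase (by exact_mod_cast hmem)).symm
      rw [hs, ← Multiset.cons_coe, Multiset.cons_le_cons_iff]
    · have : checkLoop s (l :: ls) (l :: ls) = l :: ls := by
        simp [checkLoop, hmem]
      rw [this]
      constructor
      · intro h; simp at h
      · intro h
        have hl : l ∈ (↑s : Multiset Char) :=
          Multiset.mem_of_le h (by simp : l ∈ (↑(l :: ls) : Multiset Char))
        exact absurd (by simpa using hl) hmem

theorem check_eq_decide (str_ substr_ : String) :
    check str_ substr_ = decide ((↑substr_.toList : Multiset Char) ≤ (↑str_.toList : Multiset Char)) := by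
  unfold check
  split
  · rename_i hlen
    symm
    simp only [decide_eq_false_iff_not]
    intro hle
    have := Multiset.card_le_card hle
    simp only [Multiset.coe_card] at this
    omega
  · rw [decide_eq_decide]
    exact checkLoop_iff _ _

-- a multiset not containing a is below a ::ₘ S iff it is below S
theorem le_cons_iff_of_not_mem {a : Char} {T S : Multiset Char} (h : a ∉ T) :
    T ≤ a ::ₘ S ↔ T ≤ S := by
  constructor
  · intro hle
    rw [Multiset.le_iff_count] at hle ⊢
    intro b
    have := hle b
    rcases eq_or_ne b a with rfl | hba
    · simp [Multiset.count_eq_zero.mpr h]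
    · simpa [Multiset.count_cons, hba] using this
  · intro hle
    exact hle.trans (Multiset.le_cons_self _ _)

-- B's merge over sorted lists decides multiset containment
theorem mergeLoop_iff : ∀ (s t : List Char),
    s.Pairwise (· ≤ ·) → t.Pairwise (· ≤ ·) →
    (mergeLoop s t = true ↔ (↑t : Multiset Char) ≤ (↑s : Multiset Char)) := by
  intro s
  induction s with
  | nil =>
    intro t _ _
    cases t with
    | nil => simp [mergeLoop]
    | cons c t' =>
      simp only [mergeLoop]
      constructor
      · intro h; exact absurd h (by simp)
      · intro h
        have : (c : Char) ∈ (↑([] : List Char) : Multiset Char) := Multiset.mem_of_le h (by simp)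
        simp at this
  | cons a s' ih =>
    intro t hps hpt
    cases t with
    | nil => simp [mergeLoop]
    | cons c t' =>
      have hs' : s'.Pairwise (· ≤ ·) := hps.tail
      have ht' : t'.Pairwise (· ≤ ·) := hpt.tail
      have has' : ∀ x ∈ s', a ≤ x := fun x hx => List.rel_of_pairwise_cons hps hx
      have hct' : ∀ x ∈ t', c ≤ x := fun x hx => List.rel_of_pairwise_cons hpt hx
      simp only [mergeLoop]
      by_cases hac : a < c
      · rw [if_pos hac, ih (c :: t') hs' hpt]
        have hnotmem : a ∉ (↑(c :: t') : Multiset Char) := by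
          simp only [← Multiset.cons_coe, Multiset.mem_cons, Multiset.mem_coe]
          push Not
          exact ⟨ne_of_lt hac, fun hx => absurd (lt_of_lt_of_le hac (hct' a hx)) (lt_irrefl a)⟩
        rw [← Multiset.cons_coe (l := s'), le_cons_iff_of_not_mem hnotmem]
      · rw [if_neg hac]
        by_cases heq : a = c
        · subst heq
          rw [if_pos rfl, ih t' hs' ht']
          rw [← Multiset.cons_coe, ← Multiset.cons_coe, Multiset.cons_le_cons_iff]
        · rw [if_neg heq]
          have hca : c < a := lt_of_le_of_ne (le_of_not_gt hac) (Ne.symm heq)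
          constructor
          · intro h; exact absurd h (by simp)
          · intro h
            have hc : (c : Char) ∈ (↑(a :: s') : Multiset Char) := Multiset.mem_of_le h (by simp)
            simp only [Multiset.mem_coe, List.mem_cons] at hc
            rcases hc with rfl | hc
            · exact absurd hca (lt_irrefl c)
            · exact absurd (lt_of_lt_of_le hca (has' c hc)) (lt_irrefl c)

theorem check_alt_eq_decide (str_ substr_ : String) :
    check_alt str_ substr_ = decide ((↑substr_.toList : Multiset Char) ≤ (↑str_.toList : Multiset Char)) := by
  unfold check_alt
  have hmerge := mergeLoop_iff (PySem.List.sorted str_.toList (fun c => c) false)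
      (PySem.List.sorted substr_.toList (fun c => c) false)
      (PySem.List.sorted_pairwise str_.toList (fun c => c))
      (PySem.List.sorted_pairwise substr_.toList (fun c => c))
  have hs : (↑(PySem.List.sorted str_.toList (fun c => c) false) : Multiset Char) = ↑str_.toList :=
    Multiset.coe_eq_coe.mpr (PySem.List.sorted_perm _ _ _)
  have ht : (↑(PySem.List.sorted substr_.toList (fun c => c) false) : Multiset Char) = ↑substr_.toList :=
    Multiset.coe_eq_coe.mpr (PySem.List.sorted_perm _ _ _)
  rw [hs, ht] at hmerge
  cases hb : mergeLoop (PySem.List.sorted str_.toList (fun c => c) false)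
      (PySem.List.sorted substr_.toList (fun c => c) false)
  · symm; simp only [decide_eq_false_iff_not]
    intro hle
    exact absurd (hmerge.mpr hle) (by simp [hb])
  · symm; simp only [decide_eq_true_eq]
    exact hmerge.mp hb

-- ===== VERDICT (by name: the statement is the Claim_ definition above) =====
theorem check_spec : Claim_equal_check := by
  intro str_ substr_ _
  unfold Spec_check
  rw [check_eq_decide, check_alt_eq_decide]
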